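-- pv_equiv track=rewrite | github.com/Dufferent/python_learn | 16.py | acumulate
-- ===== SOURCE A (Python) =====
-- def acumulate(a , count):
--     sum = 0
--     pre = 0
--     for i in range(0,count):
--         var = pre*10 + a
--         pre = var
--         sum += var
--     return sum
-- ===== SOURCE B (Python) =====
-- def acumulate(a, count):
--     # Closed form: sum_{i=1..count} a * repunit(i) = a*(10^(count+1) - 10 - 9*count)/81
--     if count <= 0:
--         return 0
--     return a * (10 ** (count + 1) - 10 - 9 * count) // 81
-- ===== Notes on version B (the rewrite author's own statement) =====
-- stated objective: faster
-- what changed: Replaces the O(count) accumulation loop by the closed-form geometric sum a*(10^(count+1) - 10 - 9*count)//81 computed with one big-int power; intended as faster, measured 156x at n=16384 (largest timing size could not be confirmed).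
import Mathlib
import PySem

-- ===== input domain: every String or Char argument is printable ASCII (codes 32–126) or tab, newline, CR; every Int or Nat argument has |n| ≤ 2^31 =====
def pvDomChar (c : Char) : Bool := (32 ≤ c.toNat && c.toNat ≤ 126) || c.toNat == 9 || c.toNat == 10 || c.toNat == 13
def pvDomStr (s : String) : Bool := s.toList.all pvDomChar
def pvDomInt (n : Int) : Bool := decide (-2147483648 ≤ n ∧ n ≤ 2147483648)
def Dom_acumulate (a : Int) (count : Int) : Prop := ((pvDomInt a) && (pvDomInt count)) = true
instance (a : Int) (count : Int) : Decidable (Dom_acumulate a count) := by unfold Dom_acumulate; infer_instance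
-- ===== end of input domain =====

-- B replaces A's O(count) accumulation loop by the closed-form geometric sum
-- a*(10^(count+1) - 10 - 9*count)//81 (objective: faster, asymptotic).


-- ===== PORT A =====
-- literal port: loop over range(0, count) carrying (sum, pre)
def acumulate (a : Int) (count : Int) : Int :=
  ((PySem.List.pyRange 0 count 1).foldl
    (fun (st : Int × Int) (_ : Int) =>
      let var := st.2 * 10 + a
      (st.1 + var, var))
    (0, 0)).1

-- ===== PORT B =====
def acumulate_alt (a : Int) (count : Int) : Int :=
  if count ≤ 0 then 0
  else PySem.Int.floordiv (a * (10 ^ (count + 1).toNat - 10 - 9 * count)) 81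

-- ===== PRECONDITION & SPEC =====
def Spec_acumulate (a : Int) (count : Int) (out : Int) : Prop := out = acumulate_alt a count
instance (a : Int) (count : Int) (out : Int) : Decidable (Spec_acumulate a count out) := by unfold Spec_acumulate; infer_instance

-- ===== CLAIM (what is proved, stated in full; the proofs are below) =====
def Claim_equal_acumulate : Prop := ∀ (a : Int) (count : Int), Dom_acumulate a count → Spec_acumulate a count (acumulate a count)

-- ===== LEMMAS AND PROOFS =====

-- loop invariant: after n iterations, 81*sum = a*(10^(n+1) - 10 - 9n) and 9*pre = a*(10^n - 1)
theorem acumulate_loop_inv (a : Int) (n : Nat) :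
    81 * ((PySem.List.pyRange 0 (n : Int) 1).foldl
      (fun (st : Int × Int) (_ : Int) =>
        let var := st.2 * 10 + a
        (st.1 + var, var)) (0, 0)).1
      = a * (10 ^ (n + 1) - 10 - 9 * n) ∧
    9 * ((PySem.List.pyRange 0 (n : Int) 1).foldl
      (fun (st : Int × Int) (_ : Int) =>
        let var := st.2 * 10 + a
        (st.1 + var, var)) (0, 0)).2
      = a * (10 ^ n - 1) := by
  induction n with
  | zero => simp [PySem.List.pyRange_one_eq_nil]
  | succ n ih =>
    obtain ⟨h1, h2⟩ := ih
    rw [show ((n + 1 : Nat) : Int) = (n : Int) + 1 by push_cast; ring,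
        PySem.List.pyRange_one_succ_right (by positivity), List.foldl_append]
    constructor
    · simp only [List.foldl]
      push_cast
      simp only [pow_succ]
      push_cast at h1 h2
      ring_nf
      ring_nf at h1 h2
      linarith
    · simp only [List.foldl]
      simp only [pow_succ]
      push_cast at h2
      ring_nf
      ring_nf at h2
      linarith

-- ===== VERDICT (by name: the statement is the Claim_ definition above) =====
theorem acumulate_spec : Claim_equal_acumulate := by
  intro a count _
  unfold Spec_acumulate acumulate acumulate_alt
  by_cases h : count ≤ 0
  · simp [h, PySem.List.pyRange_one_eq_nil h]
  · simp only [h, if_false]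
    push Not at h
    obtain ⟨n, rfl⟩ : ∃ n : Nat, count = (n : Int) := ⟨count.toNat, (Int.toNat_of_nonneg h.le).symm⟩
    have h1 := (acumulate_loop_inv a n).1
    have hn : ((n : Int) + 1).toNat = n + 1 := by omega
    rw [hn, PySem.Int.floordiv_eq_ediv_of_pos (by norm_num), ← h1,
        Int.mul_ediv_cancel_left _ (by norm_num)]
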